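-- pv_equiv track=rewrite | github.com/GIS-DHSIT/DocWain | src/embed/entity_extractor.py | _titlecase_phrases
-- ===== SOURCE A (Python) =====
-- from typing import Dict, Iterable, List, Optional
--
-- def _titlecase_phrases(tokens: List[str]) -> List[str]:
--     phrases: List[str] = []
--     current: List[str] = []
--     for token in tokens:
--         if _is_titlecase(token):
--             current.append(token)
--         else:
--             if len(current) >= 2:
--                 phrases.append(" ".join(current))
--             current = []
--     if len(current) >= 2:
--         phrases.append(" ".join(current))
--     return phrases
--
-- def _is_titlecase(token: str) -> bool:
--     if not token:
--         return False
--     if not token[0].isupper():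
--         return False
--     if any(ch.isdigit() for ch in token):
--         return False
--     rest = token[1:]
--     if not rest:
--         return False
--     return rest.islower() or rest.istitle()
-- ===== SOURCE B (Python) =====
-- def _titlecase_phrases(tokens):
--     # Scans one maximal run of equal-titlecaseness at a time instead of
--     # keeping a 'current' accumulator with a duplicated end-of-loop flush.
--     phrases = []
--     rest = tokens
--     while rest:
--         k = _is_titlecase(rest[0])
--         j = 1
--         while j < len(rest) and _is_titlecase(rest[j]) == k:
--             j += 1
--         if k and j >= 2:
--             phrases.append(" ".join(rest[:j]))
--         rest = rest[j:]
--     return phrases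
--
-- def _is_titlecase(token):
--     if not token:
--         return False
--     if not token[0].isupper():
--         return False
--     if any(ch.isdigit() for ch in token):
--         return False
--     rest = token[1:]
--     if not rest:
--         return False
--     return rest.islower() or rest.istitle()
-- ===== Notes on version B (the rewrite author's own statement) =====
-- stated objective: alternative
-- what changed: Replaces A's token-by-token accumulator with a duplicated end-of-loop flush by a loop that consumes one maximal run of equal titlecaseness per iteration and emits the phrase for qualifying runs directly.
import Mathlib
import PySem

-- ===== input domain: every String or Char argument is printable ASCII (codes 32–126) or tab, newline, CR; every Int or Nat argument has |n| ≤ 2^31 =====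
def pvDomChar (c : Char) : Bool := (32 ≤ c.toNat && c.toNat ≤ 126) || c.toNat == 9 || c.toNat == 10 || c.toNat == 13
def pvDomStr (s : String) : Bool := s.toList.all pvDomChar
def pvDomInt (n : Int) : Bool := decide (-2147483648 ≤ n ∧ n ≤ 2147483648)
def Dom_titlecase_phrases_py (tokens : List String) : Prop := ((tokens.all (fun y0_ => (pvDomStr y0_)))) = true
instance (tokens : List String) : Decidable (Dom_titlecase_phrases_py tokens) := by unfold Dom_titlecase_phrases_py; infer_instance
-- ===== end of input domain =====

-- B replaces A's token-accumulator-with-end-flush by a loop that consumes one maximal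
-- run of equal titlecaseness per iteration (alternative decomposition, same cost).


-- ===== PORT A =====
-- shared helper _is_titlecase (used verbatim by both Pythons)

-- rest.islower(): exact on the ASCII domain (cased chars = letters): all cased chars
-- lowercase and at least one cased char.
def pvIslower (s : List Char) : Bool :=
  s.any PySem.Chars.islower && !s.any PySem.Chars.isupper

-- rest.istitle(): exact on the ASCII domain; state machine (prevCased, foundCased).
def pvIstitleAux : List Char → Bool → Bool → Bool
  | [], _, found => found
  | c :: cs, prevCased, found =>
    if PySem.Chars.isupper c then
      if prevCased then false else pvIstitleAux cs true true
    else if PySem.Chars.islower c then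
      if prevCased then pvIstitleAux cs true true else false
    else pvIstitleAux cs false found

def pvIstitle (s : List Char) : Bool := pvIstitleAux s false false

def pvIsTitlecase (token : String) : Bool :=
  let s := token.toList
  match s with
  | [] => false                                   -- if not token: return False
  | c :: rest =>
    if !PySem.Chars.isupper c then false          -- not token[0].isupper()
    else if s.any PySem.Chars.isdigit then false  -- any(ch.isdigit() ...)
    else if rest = [] then false                  -- token[1:] empty
    else pvIslower rest || pvIstitle rest

def titlecase_phrases_py (tokens : List String) : List String :=
  let st := tokens.foldl
    (fun (st : List String × List String) token =>
      if pvIsTitlecase token then (st.1, st.2 ++ [token])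
      else if 2 ≤ st.2.length then (st.1 ++ [PySem.Str.join " " st.2], [])
      else (st.1, []))
    ([], [])
  if 2 ≤ st.2.length then st.1 ++ [PySem.Str.join " " st.2] else st.1

-- ===== PORT B =====
def titlecase_phrases_py_alt_loop (phrases : List String) (rest : List String) : List String :=
  match rest with
  | [] => phrases
  | r :: rs =>
    let k := pvIsTitlecase r
    -- inner while: j-1 = length of the maximal prefix of rs with the same key
    let g := rs.takeWhile (fun x => pvIsTitlecase x == k)
    let phrases' :=
      if k && decide (2 ≤ 1 + g.length) then phrases ++ [PySem.Str.join " " (r :: g)]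
      else phrases
    titlecase_phrases_py_alt_loop phrases' (rs.dropWhile (fun x => pvIsTitlecase x == k))
termination_by rest.length
decreasing_by
  simp only [List.length_cons]
  exact Nat.lt_succ_of_le (List.length_dropWhile_le _ _)

def titlecase_phrases_py_alt (tokens : List String) : List String :=
  titlecase_phrases_py_alt_loop [] tokens

-- ===== PRECONDITION & SPEC =====
def Spec_titlecase_phrases_py (tokens : List String) (out : List String) : Prop := out = titlecase_phrases_py_alt tokens
instance (tokens : List String) (out : List String) : Decidable (Spec_titlecase_phrases_py tokens out) := by unfold Spec_titlecase_phrases_py; infer_instance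

-- ===== CLAIM (what is proved, stated in full; the proofs are below) =====
def Claim_equal_titlecase_phrases_py : Prop := ∀ (tokens : List String), Dom_titlecase_phrases_py tokens → Spec_titlecase_phrases_py tokens (titlecase_phrases_py tokens)

-- ===== LEMMAS AND PROOFS =====

-- A's loop body, recast as structural recursion on the remaining tokens with the
-- pending 'current' group as argument (phrases accumulate on the outside).
def pvALoop (cur : List String) : List String → List String
  | [] => if 2 ≤ cur.length then [PySem.Str.join " " cur] else []
  | t :: ts =>
    if pvIsTitlecase t then pvALoop (cur ++ [t]) ts
    else (if 2 ≤ cur.length then [PySem.Str.join " " cur] else []) ++ pvALoop [] ts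

theorem pvALoop_foldl (ts : List String) : ∀ (phrases cur : List String),
    (let st := ts.foldl
      (fun (st : List String × List String) token =>
        if pvIsTitlecase token then (st.1, st.2 ++ [token])
        else if 2 ≤ st.2.length then (st.1 ++ [PySem.Str.join " " st.2], [])
        else (st.1, []))
      (phrases, cur)
     if 2 ≤ st.2.length then st.1 ++ [PySem.Str.join " " st.2] else st.1)
    = phrases ++ pvALoop cur ts := by
  induction ts with
  | nil =>
    intro phrases cur
    simp only [List.foldl_nil, pvALoop]
    split <;> simp
  | cons t ts ih =>
    intro phrases cur
    simp only [List.foldl_cons, pvALoop]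
    by_cases h : pvIsTitlecase t
    · simp only [h, if_true]
      exact ih phrases (cur ++ [t])
    · simp only [h, if_false, Bool.false_eq_true]
      by_cases h2 : 2 ≤ cur.length
      · simp only [h2, if_true]
        rw [ih (phrases ++ [PySem.Str.join " " cur]) []]
        simp
      · simp only [h2, if_false]
        rw [ih phrases []]
        simp

-- entering A's loop, the pending group absorbs the maximal titlecase prefix
theorem pvALoop_run (ts : List String) : ∀ (cur : List String),
    pvALoop cur ts =
      (if 2 ≤ (cur ++ ts.takeWhile pvIsTitlecase).length
        then [PySem.Str.join " " (cur ++ ts.takeWhile pvIsTitlecase)] else [])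
      ++ pvALoop [] (ts.dropWhile pvIsTitlecase) := by
  induction ts with
  | nil => intro cur; simp [pvALoop]
  | cons t ts ih =>
    intro cur
    by_cases h : pvIsTitlecase t
    · simp only [pvALoop, h, if_true, List.takeWhile_cons, List.dropWhile_cons]
      rw [ih (cur ++ [t])]
      simp
    · rw [List.takeWhile_cons, List.dropWhile_cons]
      simp only [h, Bool.false_eq_true, if_false, List.append_nil]
      conv_lhs => rw [pvALoop]
      conv_rhs => rw [pvALoop]
      simp [h]

-- B's loop drops a leading run of non-titlecase tokens without emitting anything
theorem pvBLoop_skip_false (phrases : List String) (xs : List String) :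
    titlecase_phrases_py_alt_loop phrases (xs.dropWhile (fun x => !pvIsTitlecase x))
      = titlecase_phrases_py_alt_loop phrases xs := by
  cases xs with
  | nil => rfl
  | cons x xs =>
    by_cases h : pvIsTitlecase x
    · simp [h]
    · simp only [List.dropWhile_cons, h, Bool.not_false, if_true]
      conv_rhs => rw [titlecase_phrases_py_alt_loop]
      simp only [h, Bool.false_and, Bool.false_eq_true, if_false]
      have : (fun x => pvIsTitlecase x == false) = (fun x => !pvIsTitlecase x) := by
        funext y; cases pvIsTitlecase y <;> rfl
      rw [this]

-- main: B's run-scanning loop = the phrases so far ++ A's loop on an empty pending group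
theorem pvMain (n : ℕ) : ∀ (ts : List String), ts.length ≤ n → ∀ (phrases : List String),
    titlecase_phrases_py_alt_loop phrases ts = phrases ++ pvALoop [] ts := by
  induction n with
  | zero =>
    intro ts h phrases
    have : ts = [] := List.eq_nil_of_length_eq_zero (Nat.le_zero.mp h)
    subst this
    rw [titlecase_phrases_py_alt_loop]
    simp [pvALoop]
  | succ n ih =>
    intro ts h phrases
    cases ts with
    | nil =>
      rw [titlecase_phrases_py_alt_loop]
      simp [pvALoop]
    | cons t ts =>
      simp only [List.length_cons] at h
      by_cases ht : pvIsTitlecase t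
      · -- both sides consume the maximal titlecase run t :: takeWhile
        have htw : (fun x => pvIsTitlecase x == true) = pvIsTitlecase := by
          funext y; cases pvIsTitlecase y <;> rfl
        rw [titlecase_phrases_py_alt_loop]
        simp only [ht, Bool.true_and]
        rw [htw]
        have hdlen : (ts.dropWhile pvIsTitlecase).length ≤ n := by
          have := List.length_dropWhile_le pvIsTitlecase ts
          omega
        rw [ih _ hdlen]
        simp only [pvALoop, ht, if_true]
        simp only [List.nil_append]
        rw [pvALoop_run ts [t]]
        rw [Nat.add_comm 1 (ts.takeWhile pvIsTitlecase).length]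
        simp only [List.singleton_append, List.length_cons]
        split <;> simp_all
      · -- A drops t; B drops the whole leading non-titlecase run
        rw [titlecase_phrases_py_alt_loop]
        simp only [ht, Bool.false_and, Bool.false_eq_true, if_false]
        have hpred : (fun x => pvIsTitlecase x == false) = (fun x => !pvIsTitlecase x) := by
          funext y; cases pvIsTitlecase y <;> rfl
        rw [hpred, pvBLoop_skip_false]
        have hts : ts.length ≤ n := by omega
        rw [ih ts hts phrases]
        simp only [pvALoop, ht, Bool.false_eq_true, if_false]
        simp

-- ===== VERDICT (by name: the statement is the Claim_ definition above) =====
theorem titlecase_phrases_py_spec : Claim_equal_titlecase_phrases_py := by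
  intro tokens _
  unfold Spec_titlecase_phrases_py
  have hA : titlecase_phrases_py tokens = [] ++ pvALoop [] tokens :=
    pvALoop_foldl tokens [] []
  have hB : titlecase_phrases_py_alt tokens = [] ++ pvALoop [] tokens :=
    pvMain tokens.length tokens le_rfl []
  rw [hA, hB]
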